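-- pv_equiv track=rewrite | github.com/ASSERT-KTH/harvest | notify-ml-on-code-fast.py | collect_matches
-- ===== SOURCE A (Python) =====
-- def unique_in_order(items):
--     """Deduplicate while preserving input order."""
--     return list(dict.fromkeys(items))
--
-- def collect_matches(text, keyword_map):
--     """Return matched categories and keywords for a lower-cased text."""
--     matched_categories = []
--     matched_keywords = []
--
--     for category, keywords in keyword_map.items():
--         category_matched = False
--         for keyword in keywords:
--             if keyword.lower() in text:
--                 matched_keywords.append(keyword)
--                 category_matched = True
--         if category_matched:
--             matched_categories.append(category)
--
--     return unique_in_order(matched_categories), unique_in_order(matched_keywords)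
-- ===== SOURCE B (Python) =====
-- def unique_in_order(items):
--     """Deduplicate while preserving input order."""
--     return list(dict.fromkeys(items))
--
-- def collect_matches(text, keyword_map):
--     """Return matched categories and keywords for a lower-cased text."""
--     matched_keywords = [kw
--                         for _, keywords in keyword_map.items()
--                         for kw in keywords
--                         if kw.lower() in text]
--     matched_categories = [category
--                           for category, keywords in keyword_map.items()
--                           if any(kw.lower() in text for kw in keywords)]
--     return unique_in_order(matched_categories), unique_in_order(matched_keywords)
-- ===== Notes on version B (the rewrite author's own statement) =====
-- stated objective: simpler
-- what changed: Replaces A's single nested loop with a mutable category_matched flag and two shared accumulators by two independent declarative passes: a flat comprehension over (category, keywords) pairs for matched keywords, and a filter with short-circuiting any() for matched categories.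
import Mathlib
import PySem

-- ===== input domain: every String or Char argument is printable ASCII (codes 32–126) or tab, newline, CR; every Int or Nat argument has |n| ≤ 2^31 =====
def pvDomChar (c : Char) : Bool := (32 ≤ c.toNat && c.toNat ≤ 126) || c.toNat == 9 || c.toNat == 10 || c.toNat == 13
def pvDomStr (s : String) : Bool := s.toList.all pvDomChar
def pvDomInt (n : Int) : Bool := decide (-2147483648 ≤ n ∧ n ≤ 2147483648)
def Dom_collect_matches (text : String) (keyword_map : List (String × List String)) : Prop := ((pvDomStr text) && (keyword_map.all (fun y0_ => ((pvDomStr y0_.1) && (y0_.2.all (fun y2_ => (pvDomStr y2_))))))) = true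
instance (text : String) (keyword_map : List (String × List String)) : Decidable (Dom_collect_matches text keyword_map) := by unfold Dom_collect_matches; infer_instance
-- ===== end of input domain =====

-- ===== PORT A =====
-- A: one nested pass; inner loop appends matching keywords and sets a flag, outer appends the category when the flag is set; final dedup.
def collect_matches (text : String) (keyword_map : List (String × List String)) : List String × List String :=
  let st := keyword_map.foldl (fun (acc : List String × List String) p =>
    let inner := p.2.foldl (fun (st : List String × Bool) kw =>
      if PySem.Str.isIn (PySem.Str.lower kw) text then (st.1 ++ [kw], true) else st)
      (acc.2, false)
    (if inner.2 then acc.1 ++ [p.1] else acc.1, inner.1)) ([], [])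
  (PySem.List.dedup st.1, PySem.List.dedup st.2)

-- ===== PORT B =====
-- B: two independent declarative passes (flat filter for keywords, any-based filter for categories), then dedup.
def collect_matches_alt (text : String) (keyword_map : List (String × List String)) : List String × List String :=
  let matched_keywords := keyword_map.flatMap (fun p =>
    p.2.filter (fun kw => PySem.Str.isIn (PySem.Str.lower kw) text))
  let matched_categories := (keyword_map.filter (fun p =>
    p.2.any (fun kw => PySem.Str.isIn (PySem.Str.lower kw) text))).map Prod.fst
  (PySem.List.dedup matched_categories, PySem.List.dedup matched_keywords)

-- ===== PRECONDITION & SPEC =====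
def Spec_collect_matches (text : String) (keyword_map : List (String × List String)) (out : List String × List String) : Prop := out = collect_matches_alt text keyword_map
instance (text : String) (keyword_map : List (String × List String)) (out : List String × List String) : Decidable (Spec_collect_matches text keyword_map out) := by unfold Spec_collect_matches; infer_instance

-- ===== CLAIM (what is proved, stated in full; the proofs are below) =====
def Claim_equal_collect_matches : Prop := ∀ (text : String) (keyword_map : List (String × List String)), Dom_collect_matches text keyword_map → Spec_collect_matches text keyword_map (collect_matches text keyword_map)

-- ===== LEMMAS AND PROOFS =====

-- inner loop of A = append-filter plus any-flag (abstract predicate)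
theorem cm_inner {q : String → Bool} (kws : List String) (acc : List String) (b : Bool) :
    kws.foldl (fun (st : List String × Bool) kw =>
      if q kw then (st.1 ++ [kw], true) else st) (acc, b)
    = (acc ++ kws.filter q, b || kws.any q) := by
  induction kws generalizing acc b with
  | nil => simp
  | cons k ks ih =>
    by_cases hk : q k = true <;>
      simp [List.foldl_cons, hk, ih]

-- outer loop of A = the two independent passes of B, generalized over the accumulator
theorem cm_outer {q : String → Bool} (km : List (String × List String))
    (mc mk : List String) :
    km.foldl (fun (acc : List String × List String) p =>
      let inner := p.2.foldl (fun (st : List String × Bool) kw =>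
        if q kw then (st.1 ++ [kw], true) else st) (acc.2, false)
      (if inner.2 then acc.1 ++ [p.1] else acc.1, inner.1)) (mc, mk)
    = (mc ++ (km.filter (fun p => p.2.any q)).map Prod.fst,
       mk ++ km.flatMap (fun p => p.2.filter q)) := by
  induction km generalizing mc mk with
  | nil => simp
  | cons p ps ih =>
    rw [List.foldl_cons]
    have h1 : (let inner := p.2.foldl (fun (st : List String × Bool) kw =>
          if q kw then (st.1 ++ [kw], true) else st) ((mc, mk).2, false)
        ((if inner.2 then (mc, mk).1 ++ [p.1] else (mc, mk).1, inner.1) : List String × List String))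
        = (if p.2.any q then mc ++ [p.1] else mc, mk ++ p.2.filter q) := by
      simp only [cm_inner, Bool.false_or]
    rw [h1]
    by_cases hp : p.2.any q = true <;>
      simp [hp, ih]

-- ===== VERDICT =====
theorem collect_matches_spec : Claim_equal_collect_matches := by
  intro text km _
  unfold Spec_collect_matches collect_matches collect_matches_alt
  simp only [cm_outer]
  simp
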